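-- pv_equiv track=rewrite | github.com/jhw/pareto2 | pareto2/recipes/web_site/__init__.py | dehungarorise
-- ===== SOURCE A (Python) =====
-- def dehungarorise(text):
--     buf, tok = [], ""
--     for c in text:
--         if c.upper() == c:
--             if tok != "":
--                 buf.append(tok)
--             tok = c.lower()
--         else:
--             tok += c
--     if tok != "":
--         buf.append(tok)
--     return "-".join(buf)
-- ===== SOURCE B (Python) =====
-- def dehungarorise(text):
--     idx = [i for i, c in enumerate(text) if c.upper() == c]
--     if not idx:
--         return text.lower()
--     segs = []
--     if idx[0] != 0:
--         segs.append(text[:idx[0]].lower())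
--     bounds = idx[1:] + [len(text)]
--     for s, e in zip(idx, bounds):
--         segs.append(text[s:e].lower())
--     return "-".join(segs)
-- ===== Notes on version B (the rewrite author's own statement) =====
-- stated objective: alternative
-- what changed: Replaces A's running token accumulator (char-by-char tok building with flush-on-boundary) by a two-phase index-table pass: collect all boundary positions, then emit lowered slices between consecutive boundaries.
import Mathlib
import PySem

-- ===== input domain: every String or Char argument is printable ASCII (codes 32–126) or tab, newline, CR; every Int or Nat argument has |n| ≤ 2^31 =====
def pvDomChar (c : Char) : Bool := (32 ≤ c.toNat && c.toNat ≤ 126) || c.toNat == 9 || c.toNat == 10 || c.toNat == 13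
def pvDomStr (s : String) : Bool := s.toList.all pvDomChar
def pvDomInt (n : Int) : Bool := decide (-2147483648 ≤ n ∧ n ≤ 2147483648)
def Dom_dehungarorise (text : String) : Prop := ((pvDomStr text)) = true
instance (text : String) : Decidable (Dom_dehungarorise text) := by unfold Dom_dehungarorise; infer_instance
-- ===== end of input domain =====

-- B replaces A's running-token accumulator loop by a boundary-index table followed by slicing; alternative decomposition, same cost.

-- the boundary test both Pythons share: c.upper() == c
def pvB (c : Char) : Bool := PySem.Chars.upperChar c == c

-- ===== PORT A =====
-- A's for-loop as a foldl over the state (buf, tok); pvFlush is the trailing "if tok: buf.append(tok)".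
def pvStep (st : List (List Char) × List Char) (c : Char) : List (List Char) × List Char :=
  if pvB c then ((if st.2 ≠ [] then st.1 ++ [st.2] else st.1), [PySem.Chars.lowerChar c])
  else (st.1, st.2 ++ [c])

def pvFlush (st : List (List Char) × List Char) : List (List Char) :=
  if st.2 ≠ [] then st.1 ++ [st.2] else st.1

def dehungarorise (text : String) : String :=
  String.ofList (PySem.Chars.join ['-'] (pvFlush (text.toList.foldl pvStep ([], []))))

-- ===== PORT B =====
-- Source B: boundary-index comprehension, then lowered slices between consecutive boundary indices.
def dehungarorise_alt (text : String) : String :=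
  let cs := text.toList
  let idx : List Int :=
    ((PySem.List.enumerate cs).filter (fun p => pvB p.2)).map (·.1)
  match idx with
  | [] => PySem.Str.lower text
  | i0 :: tl =>
    let segs :=
      (if i0 ≠ 0 then [PySem.Chars.lower (PySem.List.slice cs (some 0) (some i0))] else [])
      ++ ((i0 :: tl).zip (tl ++ [(cs.length : Int)])).map
           (fun p => PySem.Chars.lower (PySem.List.slice cs (some p.1) (some p.2)))
    String.ofList (PySem.Chars.join ['-'] segs)

-- ===== PRECONDITION & SPEC =====
def Spec_dehungarorise (text : String) (out : String) : Prop := out = dehungarorise_alt text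
instance (text : String) (out : String) : Decidable (Spec_dehungarorise text out) := by unfold Spec_dehungarorise; infer_instance

-- ===== CLAIM (what is proved, stated in full; the proofs are below) =====
def Claim_equal_dehungarorise : Prop := ∀ (text : String), Dom_dehungarorise text → Spec_dehungarorise text (dehungarorise text)

-- ===== LEMMAS AND PROOFS =====

-- non-boundary
def pvNB (c : Char) : Bool := !(pvB c)

-- any char with c.upper() != c is a lowercase ASCII letter, fixed by lower()
theorem pvNB_lower_fix (c : Char) (h : pvNB c = true) : PySem.Chars.lowerChar c = c := by
  have hne : PySem.Chars.upperChar c ≠ c := by simpa [pvNB, pvB] using h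
  by_cases hl : PySem.Chars.islower c = true
  · have ha : ('a' : Char) ≤ c := by simp [PySem.Chars.islower] at hl; exact hl.1
    have h97 : (97 : UInt32) ≤ c.val := by rw [Char.le_def] at ha; exact ha
    have hup : PySem.Chars.isupper c = false := by
      simp only [PySem.Chars.isupper, Bool.and_eq_false_iff, decide_eq_false_iff_not]
      right
      rw [Char.le_def]
      intro hle
      have h1 : c.val.toNat ≤ ('Z' : Char).val.toNat := UInt32.le_iff_toNat_le.mp hle
      have h2 : (97 : UInt32).toNat ≤ c.val.toNat := UInt32.le_iff_toNat_le.mp h97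
      have e1 : ('Z' : Char).val.toNat = 90 := rfl
      have e2 : (97 : UInt32).toNat = 97 := rfl
      omega
    simp [PySem.Chars.lowerChar, hup]
  · simp [PySem.Chars.upperChar, hl] at hne

theorem pvNB_list_fix (l : List Char) (h : ∀ c ∈ l, pvNB c = true) :
    PySem.Chars.lower l = l := by
  simp only [PySem.Chars.lower]
  rw [List.map_congr_left (fun c hc => pvNB_lower_fix c (h c hc))]
  exact List.map_id _


theorem pvB_head_dropWhile (l : List Char) (c : Char) (t : List Char)
    (h : l.dropWhile pvNB = c :: t) : pvB c = true := by
  have hne : l.dropWhile pvNB ≠ [] := by simp [h]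
  have hnot := List.head_dropWhile_not pvNB (l := l) hne
  have h2 : (l.dropWhile pvNB).head? = some c := by rw [h]; rfl
  rw [List.head?_eq_head hne] at h2
  rw [Option.some.injEq] at h2
  rw [h2] at hnot
  simpa [pvNB] using hnot

theorem pvMap_shift (l : List Nat) (k : Nat) :
    (l.map (· + k)).map (· + 1) = l.map (· + (k + 1)) := by
  rw [List.map_map]
  exact List.map_congr_left (fun n _ => by simp [Function.comp]; omega)

-- canonical chunk decomposition shared by both proofs
def pvChunks (c0 : Char) (rest : List Char) : List (List Char) :=
  match h : rest.dropWhile pvNB with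
  | [] => [PySem.Chars.lowerChar c0 :: rest.takeWhile pvNB]
  | c1 :: rest' =>
      (PySem.Chars.lowerChar c0 :: rest.takeWhile pvNB) :: pvChunks c1 rest'
termination_by rest.length
decreasing_by
  have hle := List.length_dropWhile_le (p := pvNB) (l := rest)
  rw [h] at hle; simp at hle; omega

def pvToks (cs : List Char) : List (List Char) :=
  match cs.dropWhile pvNB with
  | [] => if cs = [] then [] else [cs]
  | c0 :: rest =>
      (if cs.takeWhile pvNB = [] then [] else [cs.takeWhile pvNB]) ++ pvChunks c0 rest

-- ---------- A side ----------
def pvToksA (tok : List Char) : List Char → List (List Char)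
  | [] => if tok = [] then [] else [tok]
  | c :: cs =>
      if pvB c then (if tok = [] then [] else [tok]) ++ pvToksA [PySem.Chars.lowerChar c] cs
      else pvToksA (tok ++ [c]) cs

theorem pvA_fold (cs : List Char) : ∀ (buf : List (List Char)) (tok : List Char),
    pvFlush (cs.foldl pvStep (buf, tok)) = buf ++ pvToksA tok cs := by
  induction cs with
  | nil => intro buf tok; by_cases h : tok = [] <;> simp [pvFlush, pvToksA, h]
  | cons c cs ih =>
    intro buf tok
    cases hb : pvB c
    · simp [List.foldl_cons, pvStep, hb, pvToksA, ih]
    · by_cases h : tok = [] <;>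
        simp [List.foldl_cons, pvStep, hb, pvToksA, h, ih, List.append_assoc]

theorem pvToksA_nb_prefix (pre : List Char) : ∀ (tok : List Char) (cs : List Char),
    (∀ c ∈ pre, pvNB c = true) → pvToksA tok (pre ++ cs) = pvToksA (tok ++ pre) cs := by
  induction pre with
  | nil => simp
  | cons c pre ih =>
    intro tok cs h
    have hc : pvNB c = true := h c (by simp)
    have hb : pvB c = false := by simpa [pvNB] using hc
    simp [pvToksA, hb, ih (tok ++ [c]) cs (fun d hd => h d (by simp [hd])), List.append_assoc]

theorem pvToksA_chunk (n : Nat) : ∀ (rest : List Char), rest.length ≤ n → ∀ (c0 : Char),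
    pvToksA [PySem.Chars.lowerChar c0] rest = pvChunks c0 rest := by
  induction n with
  | zero =>
    intro rest h c0
    have : rest = [] := by cases rest <;> simp_all
    subst this
    simp [pvToksA, pvChunks]
  | succ n ih =>
    intro rest hlen c0
    have hdecomp : rest = rest.takeWhile pvNB ++ rest.dropWhile pvNB :=
      (List.takeWhile_append_dropWhile).symm
    rw [pvChunks]
    cases hd : rest.dropWhile pvNB with
    | nil =>
      conv_lhs => rw [hdecomp, hd]
      rw [pvToksA_nb_prefix _ _ _ (fun c hc => List.mem_takeWhile_imp hc)]
      simp [pvToksA]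
    | cons c1 rest' =>
      conv_lhs => rw [hdecomp, hd]
      rw [pvToksA_nb_prefix _ _ _ (fun c hc => List.mem_takeWhile_imp hc)]
      have hb1 : pvB c1 = true := pvB_head_dropWhile rest c1 rest' hd
      have hlen' : rest'.length ≤ n := by
        have hle := List.length_dropWhile_le (p := pvNB) (l := rest)
        rw [hd] at hle; simp at hle; omega
      simp [pvToksA, hb1, ih rest' hlen' c1]

theorem pvToksA_eq (cs : List Char) : pvToksA [] cs = pvToks cs := by
  have hdecomp : cs = cs.takeWhile pvNB ++ cs.dropWhile pvNB :=
    (List.takeWhile_append_dropWhile).symm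
  rw [pvToks]
  cases hd : cs.dropWhile pvNB with
  | nil =>
    conv_lhs => rw [hdecomp, hd]
    rw [pvToksA_nb_prefix _ _ _ (fun c hc => List.mem_takeWhile_imp hc)]
    have h2 : cs = cs.takeWhile pvNB := by conv_lhs => rw [hdecomp, hd]; rw [List.append_nil]
    by_cases h : cs = [] <;> simp [pvToksA, ← h2, h]
  | cons c0 rest =>
    conv_lhs => rw [hdecomp, hd]
    rw [pvToksA_nb_prefix _ _ _ (fun c hc => List.mem_takeWhile_imp hc)]
    have hb0 : pvB c0 = true := pvB_head_dropWhile cs c0 rest hd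
    simp [pvToksA, hb0, pvToksA_chunk rest.length rest le_rfl c0]

-- ---------- B side ----------
def pvPosns : List Char → List Nat
  | [] => []
  | c :: cs => if pvB c then 0 :: (pvPosns cs).map (· + 1) else (pvPosns cs).map (· + 1)

theorem pvPosns_append (xs ys : List Char) :
    pvPosns (xs ++ ys) = pvPosns xs ++ (pvPosns ys).map (· + xs.length) := by
  induction xs with
  | nil => simp [pvPosns]
  | cons x xs ih =>
    have hsh : ∀ l : List Nat, (l.map (· + xs.length)).map (· + 1) = l.map (· + (xs.length + 1)) :=
      fun l => pvMap_shift l xs.length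
    cases hb : pvB x <;>
      simp [pvPosns, hb, ih, List.map_append, hsh]

theorem pvPosns_nil_of_nb (xs : List Char) (h : ∀ c ∈ xs, pvNB c = true) : pvPosns xs = [] := by
  induction xs with
  | nil => rfl
  | cons x xs ih =>
    have hb : pvB x = false := by simpa [pvNB] using h x (by simp)
    simp [pvPosns, hb, ih (fun c hc => h c (by simp [hc]))]

theorem pvEnum_filter (cs : List Char) : ∀ (s : Int),
    ((PySem.List.enumerate cs s).filter (fun p => pvB p.2)).map (·.1)
      = (pvPosns cs).map (fun n => Int.ofNat n + s) := by
  induction cs with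
  | nil => intro s; simp [PySem.List.enumerate, pvPosns]
  | cons c cs ih =>
    intro s
    have key : ((pvPosns cs).map (· + 1)).map (fun n => Int.ofNat n + s)
        = (pvPosns cs).map (fun n => Int.ofNat n + (s + 1)) := by
      rw [List.map_map]
      exact List.map_congr_left (fun n _ => by simp only [Function.comp, Int.ofNat_eq_natCast]; push_cast; ring)
    rw [PySem.List.enumerate_cons, List.filter_cons]
    cases hb : pvB c
    · simp only [hb, Bool.false_eq_true, if_false]
      rw [ih (s + 1), pvPosns, hb]
      simp only [Bool.false_eq_true, if_false]
      exact key.symm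
    · simp only [hb, if_true]
      rw [List.map_cons, ih (s + 1), pvPosns, hb]
      simp only [if_true, List.map_cons]
      rw [key]
      norm_num [Int.ofNat_eq_natCast]

def pvSegPairs {α : Type} : List α → α → List (α × α)
  | [], _ => []
  | [p], L => [(p, L)]
  | p :: q :: ps, L => (p, q) :: pvSegPairs (q :: ps) L

theorem pvZip_eq_segPairs {α : Type} (ps : List α) (L : α) :
    ps.zip (ps.drop 1 ++ [L]) = pvSegPairs ps L := by
  induction ps with
  | nil => rfl
  | cons p ps ih =>
    cases ps with
    | nil => rfl
    | cons q ps' => simpa [pvSegPairs] using ih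

theorem pvSegPairs_map {α β : Type} (f : α → β) (ps : List α) (L : α) :
    pvSegPairs (ps.map f) (f L) = (pvSegPairs ps L).map (fun p => (f p.1, f p.2)) := by
  induction ps with
  | nil => rfl
  | cons p ps ih =>
    cases ps with
    | nil => rfl
    | cons q ps' => simpa [pvSegPairs] using ih

def pvSeg (cs : List Char) (p : Nat × Nat) : List Char :=
  PySem.Chars.lower (List.take (p.2 - p.1) (List.drop p.1 cs))

theorem pvSeg_shift (k : Nat) (cs full : List Char) (hk : full.drop k = cs)
    (pairs : List (Nat × Nat)) :
    (pairs.map (fun p => (p.1 + k, p.2 + k))).map (pvSeg full) = pairs.map (pvSeg cs) := by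
  rw [List.map_map]
  apply List.map_congr_left
  intro p _
  simp only [Function.comp, pvSeg]
  have h1 : List.drop (p.1 + k) full = List.drop p.1 cs := by
    rw [show p.1 + k = k + p.1 by omega, ← List.drop_drop, hk]
  rw [h1, show p.2 + k - (p.1 + k) = p.2 - p.1 by omega]

theorem pvChunks_eq (n : Nat) : ∀ (rest : List Char), rest.length ≤ n → ∀ (c0 : Char),
    (pvSegPairs (0 :: (pvPosns rest).map (· + 1)) (1 + rest.length)).map (pvSeg (c0 :: rest))
      = pvChunks c0 rest := by
  induction n with
  | zero =>
    intro rest h c0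
    have : rest = [] := by cases rest <;> simp_all
    subst this
    simp [pvPosns, pvSegPairs, pvSeg, pvChunks, PySem.Chars.lower]
  | succ n ih =>
    intro rest hlen c0
    have hdecomp : rest = rest.takeWhile pvNB ++ rest.dropWhile pvNB :=
      (List.takeWhile_append_dropWhile).symm
    have hnbpre : ∀ c ∈ rest.takeWhile pvNB, pvNB c = true :=
      fun c hc => List.mem_takeWhile_imp hc
    rw [pvChunks]
    cases hd : rest.dropWhile pvNB with
    | nil =>
      have hrest : rest = rest.takeWhile pvNB := by conv_lhs => rw [hdecomp, hd]; rw [List.append_nil]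
      have hnb : ∀ c ∈ rest, pvNB c = true := fun c hc => hnbpre c (hrest ▸ hc)
      have hp : pvPosns rest = [] := pvPosns_nil_of_nb rest hnb
      simp only [hp, List.map_nil, pvSegPairs, List.map_cons, List.map_nil]
      simp only [pvSeg, Nat.sub_zero, List.drop_zero]
      rw [List.take_of_length_le (by simp [Nat.add_comm])]
      have hlow : PySem.Chars.lower (c0 :: rest) = PySem.Chars.lowerChar c0 :: rest := by
        simp only [PySem.Chars.lower, List.map_cons]
        congr 1
        exact pvNB_list_fix rest hnb
      rw [hlow, ← hrest]
    | cons c1 rest' =>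
      have hb1 : pvB c1 = true := pvB_head_dropWhile rest c1 rest' hd
      have hlen' : rest'.length ≤ n := by
        have hle := List.length_dropWhile_le (p := pvNB) (l := rest)
        rw [hd] at hle; simp at hle; omega
      have hppre : pvPosns (rest.takeWhile pvNB) = [] := pvPosns_nil_of_nb _ hnbpre
      have hP : pvPosns rest
          = (rest.takeWhile pvNB).length :: (pvPosns rest').map (fun n => n + 1 + (rest.takeWhile pvNB).length) := by
        conv_lhs => rw [hdecomp, hd]
        rw [pvPosns_append, hppre, pvPosns, hb1]
        simp only [if_true, List.nil_append, List.map_cons, Nat.zero_add, List.map_map]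
        rfl
      have hlenrest : rest.length = (rest.takeWhile pvNB).length + (1 + rest'.length) := by
        have := congrArg List.length hdecomp
        rw [hd] at this
        simp at this
        omega
      rw [hP]
      simp only [List.map_cons, List.map_map]
      rw [show ((0 : Nat) :: ((rest.takeWhile pvNB).length + 1)
            :: ((pvPosns rest').map ((· + 1) ∘ (fun n => n + 1 + (rest.takeWhile pvNB).length))))
          = (0 : Nat) :: (((rest.takeWhile pvNB).length + 1)
            :: ((pvPosns rest').map ((· + 1) ∘ (fun n => n + 1 + (rest.takeWhile pvNB).length)))) from rfl]
      rw [show pvSegPairs ((0 : Nat) :: ((rest.takeWhile pvNB).length + 1)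
            :: ((pvPosns rest').map ((· + 1) ∘ (fun n => n + 1 + (rest.takeWhile pvNB).length)))) (1 + rest.length)
          = ((0 : Nat), (rest.takeWhile pvNB).length + 1)
            :: pvSegPairs (((rest.takeWhile pvNB).length + 1)
              :: ((pvPosns rest').map ((· + 1) ∘ (fun n => n + 1 + (rest.takeWhile pvNB).length)))) (1 + rest.length)
          from rfl]
      rw [List.map_cons]
      have hhead : pvSeg (c0 :: rest) (0, (rest.takeWhile pvNB).length + 1)
          = PySem.Chars.lowerChar c0 :: rest.takeWhile pvNB := by
        simp only [pvSeg, Nat.sub_zero, List.drop_zero, List.take_succ_cons]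
        have htake := List.take_left' (l₁ := rest.takeWhile pvNB) (l₂ := rest.dropWhile pvNB) rfl
        rw [List.takeWhile_append_dropWhile] at htake
        rw [htake]
        simp only [PySem.Chars.lower, List.map_cons]
        congr 1
        exact pvNB_list_fix _ hnbpre
      have htail : (((rest.takeWhile pvNB).length + 1)
            :: ((pvPosns rest').map ((· + 1) ∘ (fun n => n + 1 + (rest.takeWhile pvNB).length))))
          = ((0 : Nat) :: (pvPosns rest').map (· + 1)).map (· + ((rest.takeWhile pvNB).length + 1)) := by
        simp only [List.map_cons, List.map_map, Nat.zero_add]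
        congr 1
      rw [htail]
      rw [show 1 + rest.length = (1 + rest'.length) + ((rest.takeWhile pvNB).length + 1) by omega]
      rw [pvSegPairs_map]
      have hdrop : (c0 :: rest).drop ((rest.takeWhile pvNB).length + 1) = c1 :: rest' := by
        simp only [List.drop_succ_cons]
        have hdr := List.drop_left' (l₁ := rest.takeWhile pvNB) (l₂ := rest.dropWhile pvNB) rfl
        rw [List.takeWhile_append_dropWhile] at hdr
        rw [hdr, hd]
      rw [pvSeg_shift ((rest.takeWhile pvNB).length + 1) (c1 :: rest') (c0 :: rest) hdrop]
      rw [ih rest' hlen' c1, hhead]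

-- reduction lemmas for port B's match
theorem pvAlt_nil (t : String)
    (h : ((PySem.List.enumerate t.toList).filter (fun p => pvB p.2)).map (·.1) = ([] : List Int)) :
    dehungarorise_alt t = PySem.Str.lower t := by
  simp only [dehungarorise_alt]
  rw [h]

theorem pvAlt_cons (t : String) (i0 : Int) (tl : List Int)
    (h : ((PySem.List.enumerate t.toList).filter (fun p => pvB p.2)).map (·.1) = i0 :: tl) :
    dehungarorise_alt t = String.ofList (PySem.Chars.join ['-']
      ((if i0 ≠ 0 then [PySem.Chars.lower (PySem.List.slice t.toList (some 0) (some i0))] else [])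
       ++ ((i0 :: tl).zip (tl ++ [(t.toList.length : Int)])).map
            (fun p => PySem.Chars.lower (PySem.List.slice t.toList (some p.1) (some p.2))))) := by
  simp only [dehungarorise_alt]
  rw [h]

theorem pvA_toks (t : String) :
    dehungarorise t = String.ofList (PySem.Chars.join ['-'] (pvToks t.toList)) := by
  rw [dehungarorise, pvA_fold, List.nil_append, pvToksA_eq]

-- ===== VERDICT (by name: the statement is the Claim_ definition above) =====
theorem dehungarorise_spec : Claim_equal_dehungarorise := by
  unfold Claim_equal_dehungarorise Spec_dehungarorise
  intro text _
  rw [pvA_toks]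
  have hidx : ((PySem.List.enumerate text.toList).filter (fun p => pvB p.2)).map (·.1)
      = (pvPosns text.toList).map (fun n : Nat => (n : Int)) := by
    have h0 := pvEnum_filter text.toList 0
    simpa using h0
  cases hdw : text.toList.dropWhile pvNB with
  | nil =>
    have h2 := List.takeWhile_append_dropWhile (p := pvNB) (l := text.toList)
    rw [hdw, List.append_nil] at h2
    have hnb : ∀ c ∈ text.toList, pvNB c = true := fun c hc =>
      List.mem_takeWhile_imp (h2.symm ▸ hc)
    have hp : pvPosns text.toList = [] := pvPosns_nil_of_nb _ hnb
    rw [pvAlt_nil text (by rw [hidx, hp]; rfl)]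
    apply String.toList_inj.mp
    rw [PySem.Str.toList_lower, pvNB_list_fix _ hnb]
    rw [pvToks, hdw]
    by_cases hnil : text.toList = []
    · simp [hnil, PySem.Chars.join_nil]
    · simp [hnil, PySem.Chars.join_singleton]
  | cons c0 rest =>
    have hsplit := (List.takeWhile_append_dropWhile (p := pvNB) (l := text.toList)).symm
    rw [hdw] at hsplit
    have hb0 : pvB c0 = true := pvB_head_dropWhile _ _ _ hdw
    have hnbpre : ∀ c ∈ text.toList.takeWhile pvNB, pvNB c = true :=
      fun c hc => List.mem_takeWhile_imp hc
    have hppre : pvPosns (text.toList.takeWhile pvNB) = [] := pvPosns_nil_of_nb _ hnbpre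
    have hP : pvPosns text.toList
        = (text.toList.takeWhile pvNB).length
          :: (pvPosns rest).map (fun n => n + 1 + (text.toList.takeWhile pvNB).length) := by
      calc pvPosns text.toList
          = pvPosns (text.toList.takeWhile pvNB ++ (c0 :: rest)) := by rw [← hsplit]
        _ = _ := by
            rw [pvPosns_append, hppre, pvPosns, hb0]
            simp only [if_true, List.nil_append, List.map_cons, Nat.zero_add, List.map_map]
            rfl
    have hlen : text.toList.length = (text.toList.takeWhile pvNB).length + (1 + rest.length) := by
      have := congrArg List.length hsplit
      simp only [List.length_append, List.length_cons] at this
      omega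
    rw [pvAlt_cons text ((((text.toList.takeWhile pvNB).length : Nat) : Int))
        (((pvPosns rest).map (fun n => n + 1 + (text.toList.takeWhile pvNB).length)).map (fun n : Nat => (n : Int)))
        (by rw [hidx, hP]; rfl)]
    apply String.toList_inj.mp
    simp only [String.toList_ofList]
    congr 1
    rw [pvToks, hdw]
    -- head segment
    have htake := List.take_left' (l₁ := text.toList.takeWhile pvNB) (l₂ := text.toList.dropWhile pvNB) rfl
    rw [List.takeWhile_append_dropWhile] at htake
    have hhead : (if (((text.toList.takeWhile pvNB).length : Nat) : Int) ≠ 0 then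
          [PySem.Chars.lower (PySem.List.slice text.toList (some 0) (some (((text.toList.takeWhile pvNB).length : Nat) : Int)))] else [])
        = (if text.toList.takeWhile pvNB = [] then [] else [text.toList.takeWhile pvNB]) := by
      rw [PySem.List.slice_toNat (a := 0) (b := (((text.toList.takeWhile pvNB).length : Nat) : Int))
        text.toList (le_refl 0) (Int.natCast_nonneg _)]
      simp only [Int.toNat_natCast, Int.toNat_zero, Nat.sub_zero, List.drop_zero]
      rw [htake, pvNB_list_fix _ hnbpre]
      by_cases hpre : text.toList.takeWhile pvNB = []
      · simp [hpre]
      · simp [hpre]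
    rw [hhead]
    -- tail: the zipped slices equal pvChunks
    have e2 : ((pvPosns rest).map (fun n => n + 1 + (text.toList.takeWhile pvNB).length)).map (fun n : Nat => (n : Int))
        = ((pvPosns text.toList).map (fun n : Nat => (n : Int))).drop 1 := by rw [hP]; rfl
    rw [e2]
    rw [show ((((text.toList.takeWhile pvNB).length : Nat) : Int)
          :: ((pvPosns text.toList).map (fun n : Nat => (n : Int))).drop 1)
        = (pvPosns text.toList).map (fun n : Nat => (n : Int)) from by rw [hP]; rfl]
    rw [pvZip_eq_segPairs]
    rw [pvSegPairs_map (fun n : Nat => (n : Int)) (pvPosns text.toList) text.toList.length]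
    rw [List.map_map]
    rw [List.map_congr_left (l := pvSegPairs (pvPosns text.toList) text.toList.length)
        (g := pvSeg text.toList)
        (fun p _ => by
          simp only [Function.comp]
          rw [PySem.List.slice_toNat (a := (p.1 : Int)) (b := (p.2 : Int)) text.toList
            (Int.natCast_nonneg _) (Int.natCast_nonneg _)]
          simp only [Int.toNat_natCast]
          rfl)]
    have e4 : pvPosns text.toList
        = ((0 : Nat) :: (pvPosns rest).map (· + 1)).map (· + (text.toList.takeWhile pvNB).length) := by
      rw [hP]
      simp only [List.map_cons, List.map_map, Nat.zero_add]
      rfl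
    rw [e4]
    rw [show text.toList.length = (1 + rest.length) + (text.toList.takeWhile pvNB).length by omega]
    rw [pvSegPairs_map (· + (text.toList.takeWhile pvNB).length)]
    have hdropfull : text.toList.drop (text.toList.takeWhile pvNB).length = c0 :: rest := by
      have hdr := List.drop_left' (l₁ := text.toList.takeWhile pvNB) (l₂ := text.toList.dropWhile pvNB) rfl
      rw [List.takeWhile_append_dropWhile] at hdr
      rw [hdr, hdw]
    rw [pvSeg_shift (text.toList.takeWhile pvNB).length (c0 :: rest) text.toList hdropfull]
    rw [pvChunks_eq rest.length rest le_rfl c0]
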